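-- pv_equiv track=rewrite | github.com/dani170498/crypto | descifrar.py | descifrar_cesar_avanzado
-- ===== SOURCE A (Python) =====
-- def generar_clave(indice):
--     if indice == 0:
--         return 0  # Valor inicial
--     elif indice == 1:
--         return 1  # Segundo valor en la serie de Fibonacci
--
--     # Generar la serie de Fibonacci
--     a, b = 0, 1
--     for _ in range(2, indice + 1):
--         a, b = b, a + b
--
--     return b  # Devolver el valor correspondiente en la serie de Fibonacci
--
-- def descifrar_cesar_avanzado(mensaje):
--     resultado = ""
--     for i, char in enumerate(mensaje):
--         if char.isalpha():
--             ascii_offset = ord('A') if char.isupper() else ord('a')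
--             clave_actual = generar_clave(i)
--             resultado += chr((ord(char) - ascii_offset - clave_actual) % 26 + ascii_offset)
--         else:
--             resultado += char
--     return resultado
-- ===== SOURCE B (Python) =====
-- def descifrar_cesar_avanzado(mensaje):
--     # One pass: keep the current Fibonacci key and its successor reduced mod 26.
--     resultado = []
--     a, b = 0, 1  # fib(i) % 26, fib(i+1) % 26
--     for char in mensaje:
--         if char.isalpha():
--             ascii_offset = ord('A') if char.isupper() else ord('a')
--             resultado.append(chr((ord(char) - ascii_offset - a) % 26 + ascii_offset))
--         else:
--             resultado.append(char)
--         a, b = b, (a + b) % 26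
--     return "".join(resultado)
-- ===== Notes on version B (the rewrite author's own statement) =====
-- stated objective: faster
-- what changed: B makes one pass keeping the running Fibonacci key (and its successor) reduced mod 26, instead of recomputing the full big-integer Fibonacci number from scratch at every character.
import Mathlib
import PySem

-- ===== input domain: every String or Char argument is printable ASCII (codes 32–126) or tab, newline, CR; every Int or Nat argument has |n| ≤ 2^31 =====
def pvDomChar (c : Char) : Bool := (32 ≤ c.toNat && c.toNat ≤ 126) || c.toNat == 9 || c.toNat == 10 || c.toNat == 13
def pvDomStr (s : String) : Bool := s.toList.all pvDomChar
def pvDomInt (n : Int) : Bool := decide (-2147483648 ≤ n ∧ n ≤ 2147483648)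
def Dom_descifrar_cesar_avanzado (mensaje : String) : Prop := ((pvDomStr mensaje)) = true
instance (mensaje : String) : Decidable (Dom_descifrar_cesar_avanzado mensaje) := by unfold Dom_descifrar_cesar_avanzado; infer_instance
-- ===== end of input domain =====

-- B replaces A's per-character from-scratch big-integer Fibonacci recomputation by a single
-- pass keeping the running Fibonacci key and its successor reduced mod 26 (objective: faster).


-- ===== PORT A =====
def generar_clave (indice : Int) : Int :=
  if indice = 0 then 0
  else if indice = 1 then 1
  else
    -- a, b = 0, 1; for _ in range(2, indice + 1): a, b = b, a + b
    let ab := (PySem.List.pyRange 2 (indice + 1) 1).foldl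
      (fun (p : Int × Int) _ => (p.2, p.1 + p.2)) (0, 1)
    ab.2

def descifrar_cesar_avanzado (mensaje : String) : String :=
  String.mk ((PySem.List.enumerate mensaje.toList 0).foldl
    (fun (resultado : List Char) ic =>
      if PySem.Chars.isalpha ic.2 then
        let ascii_offset : Int := if PySem.Chars.isupper ic.2 then 65 else 97
        let clave_actual := generar_clave ic.1
        resultado ++ [Char.ofNat (PySem.Int.mod ((ic.2.toNat : Int) - ascii_offset - clave_actual) 26 + ascii_offset).toNat]
      else resultado ++ [ic.2]) [])

-- ===== PORT B =====
-- one pass; a = fib(i) % 26, b = fib(i+1) % 26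
def descifrar_cesar_avanzado_alt_go (cs : List Char) (a b : Int) : List Char :=
  match cs with
  | [] => []
  | c :: rest =>
    let out :=
      if PySem.Chars.isalpha c then
        let ascii_offset : Int := if PySem.Chars.isupper c then 65 else 97
        Char.ofNat (PySem.Int.mod ((c.toNat : Int) - ascii_offset - a) 26 + ascii_offset).toNat
      else c
    out :: descifrar_cesar_avanzado_alt_go rest b (PySem.Int.mod (a + b) 26)

def descifrar_cesar_avanzado_alt (mensaje : String) : String :=
  String.mk (descifrar_cesar_avanzado_alt_go mensaje.toList 0 1)

-- ===== PRECONDITION & SPEC =====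
def Spec_descifrar_cesar_avanzado (mensaje : String) (out : String) : Prop := out = descifrar_cesar_avanzado_alt mensaje
instance (mensaje : String) (out : String) : Decidable (Spec_descifrar_cesar_avanzado mensaje out) := by unfold Spec_descifrar_cesar_avanzado; infer_instance

-- ===== CLAIM (what is proved, stated in full; the proofs are below) =====
def Claim_equal_descifrar_cesar_avanzado : Prop := ∀ (mensaje : String), Dom_descifrar_cesar_avanzado mensaje → Spec_descifrar_cesar_avanzado mensaje (descifrar_cesar_avanzado mensaje)

-- ===== LEMMAS AND PROOFS =====

-- mathematical Fibonacci sequence over Int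
def pvFib : Nat → Int
  | 0 => 0
  | 1 => 1
  | n + 2 => pvFib n + pvFib (n + 1)

lemma pvFib_foldl (k : Nat) :
    (List.foldl (fun (p : Int × Int) (_ : Int) => (p.2, p.1 + p.2)) (0, 1)
      (PySem.List.pyRange 2 (2 + (k : Int)) 1)) = (pvFib k, pvFib (k + 1)) := by
  induction k with
  | zero => decide
  | succ n ih =>
    have h : (2 : Int) + ((n + 1 : Nat) : Int) = (2 + (n : Int)) + 1 := by push_cast; ring
    rw [h, PySem.List.pyRange_one_succ_right (by omega), List.foldl_append, ih]
    show (pvFib (n+1), pvFib n + pvFib (n+1)) = _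
    rw [pvFib]

lemma generar_clave_eq (n : Nat) : generar_clave (n : Int) = pvFib n := by
  match n with
  | 0 => decide
  | 1 => decide
  | m + 2 =>
    unfold generar_clave
    have h0 : ((m + 2 : Nat) : Int) ≠ 0 := by omega
    have h1 : ((m + 2 : Nat) : Int) ≠ 1 := by omega
    have h : ((m + 2 : Nat) : Int) + 1 = 2 + ((m + 1 : Nat) : Int) := by push_cast; ring
    simp only [h0, h1, if_false, h, pvFib_foldl]

-- subtracting the key mod 26 instead of the key itself gives the same residue
lemma pv_mod_key (x k : Int) :
    PySem.Int.mod (x - k) 26 = PySem.Int.mod (x - PySem.Int.mod k 26) 26 := by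
  simp only [PySem.Int.mod_eq_emod_of_pos (by norm_num : (0:Int) < 26)]
  conv_lhs => rw [Int.sub_emod]
  conv_rhs => rw [Int.sub_emod, Int.emod_emod_of_dvd _ (by norm_num : (26:Int) ∣ 26)]

lemma pv_main (cs : List Char) (n : Nat) (res : List Char) :
    (PySem.List.enumerate cs (n : Int)).foldl
      (fun (resultado : List Char) ic =>
        if PySem.Chars.isalpha ic.2 then
          let ascii_offset : Int := if PySem.Chars.isupper ic.2 then 65 else 97
          let clave_actual := generar_clave ic.1
          resultado ++ [Char.ofNat (PySem.Int.mod ((ic.2.toNat : Int) - ascii_offset - clave_actual) 26 + ascii_offset).toNat]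
        else resultado ++ [ic.2]) res
    = res ++ descifrar_cesar_avanzado_alt_go cs (PySem.Int.mod (pvFib n) 26) (PySem.Int.mod (pvFib (n + 1)) 26) := by
  induction cs generalizing n res with
  | nil => simp [PySem.List.enumerate, descifrar_cesar_avanzado_alt_go]
  | cons c rest ih =>
    rw [PySem.List.enumerate_cons, List.foldl_cons]
    have hstep : ((n : Int) + 1) = ((n + 1 : Nat) : Int) := by push_cast; ring
    rw [hstep, ih]
    have hb : PySem.Int.mod (PySem.Int.mod (pvFib n) 26 + PySem.Int.mod (pvFib (n + 1)) 26) 26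
        = PySem.Int.mod (pvFib (n + 1 + 1)) 26 := by
      simp only [PySem.Int.mod_eq_emod_of_pos (by norm_num : (0:Int) < 26)]
      show _ = pvFib (n + 2) % 26
      rw [pvFib]
      omega
    rw [descifrar_cesar_avanzado_alt_go, hb]
    by_cases ha : PySem.Chars.isalpha c
    · simp only [ha, if_true, generar_clave_eq]
      rw [pv_mod_key]
      simp
    · simp [ha]

-- ===== VERDICT (by name: the statement is the Claim_ definition above) =====
theorem descifrar_cesar_avanzado_spec : Claim_equal_descifrar_cesar_avanzado := by
  intro mensaje _
  show _ = _
  unfold descifrar_cesar_avanzado descifrar_cesar_avanzado_alt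
  have h := pv_main mensaje.toList 0 []
  simp only [Nat.cast_zero, List.nil_append, Nat.zero_add,
    show PySem.Int.mod (pvFib 0) 26 = 0 from by decide,
    show PySem.Int.mod (pvFib (0 + 1)) 26 = 1 from by decide] at h
  exact congrArg String.mk h
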